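-- pv_equiv track=rewrite | github.com/eloyhz/competitive-programming | cpbook/3_problem_solving_paradigms/11900_boiled_eggs.py | solve
-- ===== SOURCE A (Python) =====
-- def solve(n, p, q, eggs):
-- 	result = 0
-- 	weight = 0
-- 	count = 0
-- 	for i in range(n):
-- 		if count + 1 <= p and weight + eggs[i] <= q:
-- 			weight += eggs[i]
-- 			result += 1
-- 			count += 1
-- 		else:
-- 			break
-- 	return result
-- ===== SOURCE B (Python) =====
-- def solve(n, p, q, eggs):
--     def go(i, q):
--         if i >= n or i >= p or i >= len(eggs) or eggs[i] > q:
--             return i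
--         return go(i + 1, q - eggs[i])
--     return go(0, q)
-- ===== Notes on version B (the rewrite author's own statement) =====
-- stated objective: simpler
-- what changed: Replaces the break-on-failure loop with three accumulators (result, weight, count) by a short recursion on the index that shrinks the remaining budget q per egg and returns the index at the first failing guard; no weight/result/count state is kept.
-- crash fix: When n > len(eggs), p >= len(eggs)+1 and every nonempty prefix sum of eggs is <= q, A raises IndexError; B returns len(eggs). — e.g. on solve(2, 2, 5, [3]): A raises IndexError, B returns 1
import Mathlib
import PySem

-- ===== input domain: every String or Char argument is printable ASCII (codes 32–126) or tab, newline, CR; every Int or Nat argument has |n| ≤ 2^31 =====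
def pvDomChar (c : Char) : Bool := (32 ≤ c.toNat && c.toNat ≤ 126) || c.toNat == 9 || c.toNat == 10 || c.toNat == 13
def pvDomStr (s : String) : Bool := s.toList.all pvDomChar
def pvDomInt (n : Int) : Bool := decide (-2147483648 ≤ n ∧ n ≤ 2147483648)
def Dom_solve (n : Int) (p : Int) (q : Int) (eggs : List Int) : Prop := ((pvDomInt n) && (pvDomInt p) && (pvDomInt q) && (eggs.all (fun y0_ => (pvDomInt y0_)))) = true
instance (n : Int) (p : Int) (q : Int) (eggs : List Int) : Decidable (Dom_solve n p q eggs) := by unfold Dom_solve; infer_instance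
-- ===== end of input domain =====

-- B replaces A's accumulator loop (result/weight/count state, break on failure) by a
-- recursion on the index that shrinks the remaining budget q and returns the index at the
-- first failing guard; equivalence of RETURN values is proved on every input where A
-- returns (A raises IndexError exactly outside Pre_).

-- ===== PORT A =====
-- the for-i-in-range(n) loop with its break: one recursive step per remaining iteration
-- (range(n) consumed lazily, as in Python), index i and state (result, weight, count);
-- eggs[i] via pyGet? (in range whenever reached, under Pre_)
def solveGo (p : Int) (q : Int) (eggs : List Int) : Nat → Int → Int → Int → Int → Int
  | 0, _i, result, _weight, _count => result
  | fuel + 1, i, result, weight, count =>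
    let e := (PySem.List.pyGet? eggs i).getD 0
    if count + 1 ≤ p ∧ weight + e ≤ q then
      solveGo p q eggs fuel (i + 1) (result + 1) (weight + e) (count + 1)
    else result

def solve (n : Int) (p : Int) (q : Int) (eggs : List Int) : Int :=
  solveGo p q eggs n.toNat 0 0 0 0

-- ===== PORT B =====
-- Source B's inner go(i, q): guards in Python's order (i >= n, i >= p, i >= len(eggs),
-- eggs[i] > q), returning i at the first failing guard, else recursing with q - eggs[i]
def altGo (n : Int) (p : Int) (eggs : List Int) (i : Nat) (q : Int) : Int :=
  if n ≤ (i : Int) ∨ p ≤ (i : Int) ∨ eggs.length ≤ i ∨ q < eggs.getD i 0 then (i : Int)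
  else altGo n p eggs (i + 1) (q - eggs.getD i 0)
termination_by eggs.length - i
decreasing_by
  rename_i h
  push Not at h
  omega

def solve_alt (n : Int) (p : Int) (q : Int) (eggs : List Int) : Int :=
  altGo n p eggs 0 q

-- ===== PRECONDITION & SPEC =====
-- Pre_ excludes exactly the inputs on which A raises IndexError: n > len(eggs) with the
-- loop never breaking first (p ≥ len+1 and every nonempty prefix sum ≤ q).
def Pre_solve (n : Int) (p : Int) (q : Int) (eggs : List Int) : Prop :=
  ¬ ((eggs.length : Int) < n ∧ (eggs.length : Int) + 1 ≤ p ∧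
     ∀ k : Nat, k < eggs.length → (eggs.take (k + 1)).sum ≤ q)
instance (n : Int) (p : Int) (q : Int) (eggs : List Int) : Decidable (Pre_solve n p q eggs) := by unfold Pre_solve; infer_instance
def pvWitness_solve : Int × Int × Int × List Int := (3, 2, 10, [4, 5, 6])

-- When n > len(eggs), p ≥ len(eggs)+1 and every nonempty prefix sum of eggs is ≤ q,
-- A raises IndexError; B returns len(eggs).
def Raises_solve (n : Int) (p : Int) (q : Int) (eggs : List Int) : Prop :=
  (eggs.length : Int) < n ∧ (eggs.length : Int) + 1 ≤ p ∧
  ∀ k : Nat, k < eggs.length → (eggs.take (k + 1)).sum ≤ q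
instance (n : Int) (p : Int) (q : Int) (eggs : List Int) : Decidable (Raises_solve n p q eggs) := by unfold Raises_solve; infer_instance
def pvRaiseWitness_solve : Int × Int × Int × List Int := (2, 2, 5, [3])
def pvRaiseWitnessOut_solve : Int := 1

def Spec_solve (n : Int) (p : Int) (q : Int) (eggs : List Int) (out : Int) : Prop := out = solve_alt n p q eggs
instance (n : Int) (p : Int) (q : Int) (eggs : List Int) (out : Int) : Decidable (Spec_solve n p q eggs out) := by unfold Spec_solve; infer_instance

-- ===== CLAIM (what is proved, stated in full; the proofs are below) =====
def Claim_equal_solve : Prop := ∀ (n : Int) (p : Int) (q : Int) (eggs : List Int), Dom_solve n p q eggs → Pre_solve n p q eggs → Spec_solve n p q eggs (solve n p q eggs)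
def Claim_raises_solve : Prop := (∀ (n : Int) (p : Int) (q : Int) (eggs : List Int), Dom_solve n p q eggs → Raises_solve n p q eggs → ¬ Pre_solve n p q eggs) ∧ (Dom_solve (pvRaiseWitness_solve.1) (pvRaiseWitness_solve.2.1) (pvRaiseWitness_solve.2.2.1) (pvRaiseWitness_solve.2.2.2) ∧ Raises_solve (pvRaiseWitness_solve.1) (pvRaiseWitness_solve.2.1) (pvRaiseWitness_solve.2.2.1) (pvRaiseWitness_solve.2.2.2) ∧ solve_alt (pvRaiseWitness_solve.1) (pvRaiseWitness_solve.2.1) (pvRaiseWitness_solve.2.2.1) (pvRaiseWitness_solve.2.2.2) = pvRaiseWitnessOut_solve)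

-- ===== LEMMAS AND PROOFS =====

-- lockstep invariant: A's loop, entered at index c with result = count = c and accumulated
-- weight w, m iterations of range(n) remaining (m + c = n.toNat), computes exactly
-- B's go c (q - w), provided the loop is guaranteed not to run off the end of the list
-- (either all m remaining indices exist, or p, or a later over-q prefix, stops it first)
theorem go_lockstep (n p q : Int) (eggs : List Int) :
    ∀ (m c : Nat) (w : Int), m + c = n.toNat → c ≤ eggs.length →
    (c + m ≤ eggs.length ∨ p ≤ (eggs.length : Int) ∨
      ∃ k : Nat, k < eggs.length - c ∧ q < w + (((eggs.drop c).take (k + 1)).sum)) →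
    solveGo p q eggs m (c : Int) (c : Int) w (c : Int) = altGo n p eggs c (q - w) := by
  intro m
  induction m with
  | zero =>
    intro c w hm _ _
    rw [altGo]
    rw [if_pos (Or.inl (by omega))]
    rfl
  | succ m ih =>
    intro c w hm hcl hinv
    rw [altGo]
    by_cases hclen : c < eggs.length
    · have hget : (PySem.List.pyGet? eggs (c : Int)).getD 0 = eggs[c] := by
        rw [PySem.List.pyGet?_natCast, List.getElem?_eq_getElem hclen]
        rfl
      have hgetD : eggs.getD c 0 = eggs[c] := by
        simp [List.getD, List.getElem?_eq_getElem hclen]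
      have hdrop : eggs.drop c = eggs[c] :: eggs.drop (c + 1) :=
        List.drop_eq_getElem_cons hclen
      simp only [solveGo, hget, hgetD]
      by_cases h1 : (c : Int) + 1 ≤ p ∧ w + eggs[c] ≤ q
      · rw [if_pos h1]
        rw [if_neg (by push Not; refine ⟨by omega, by omega, by omega, by omega⟩)]
        have hinv' : (c + 1) + m ≤ eggs.length ∨ p ≤ (eggs.length : Int) ∨
            ∃ k : Nat, k < eggs.length - (c + 1) ∧
              q < (w + eggs[c]) + (((eggs.drop (c + 1)).take (k + 1)).sum) := by
          rcases hinv with h | h | ⟨k, hk, hq⟩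
          · exact Or.inl (by omega)
          · exact Or.inr (Or.inl h)
          · right; right
            rw [hdrop, List.take_succ_cons, List.sum_cons] at hq
            match k, hk, hq with
            | 0, hk, hq => exact absurd h1.2 (by simp at hq; omega)
            | k + 1, hk, hq => exact ⟨k, by omega, by omega⟩
        have hrange : (c : Int) + 1 = ((c + 1 : Nat) : Int) := by push_cast; ring
        rw [hrange]
        have := ih (c + 1) (w + eggs[c]) (by omega) (by omega) hinv'
        rw [this]
        have : q - w - eggs[c] = q - (w + eggs[c]) := by ring
        rw [this]
      · rw [if_neg h1]
        rcases Decidable.not_and_iff_not_or_not.mp h1 with h | h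
        · rw [if_pos (Or.inr (Or.inl (by omega)))]
        · rw [if_pos (Or.inr (Or.inr (Or.inr (by omega))))]
    · -- c = eggs.length: the invariant forces p ≤ c, so both sides stop here with c
      have hce : c = eggs.length := by omega
      have hp : p ≤ (c : Int) := by
        rcases hinv with h | h | ⟨k, hk, _⟩
        · omega
        · omega
        · omega
      have hget : (PySem.List.pyGet? eggs (c : Int)).getD 0 = 0 := by
        rw [PySem.List.pyGet?_natCast, List.getElem?_eq_none (by omega)]
        rfl
      simp only [solveGo, hget]
      rw [if_neg (by intro h; omega)]
      rw [if_pos (Or.inr (Or.inl hp))]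

-- ===== VERDICT (by name: the statement is the Claim_ definition above) =====
theorem solve_spec : Claim_equal_solve := by
  intro n p q eggs _ hpre
  unfold Spec_solve solve solve_alt
  have hinv : 0 + n.toNat ≤ eggs.length ∨ p ≤ (eggs.length : Int) ∨
      ∃ k : Nat, k < eggs.length - 0 ∧ q < 0 + (((eggs.drop 0).take (k + 1)).sum) := by
    by_cases hn : n ≤ (eggs.length : Int)
    · exact Or.inl (by omega)
    · unfold Pre_solve at hpre
      push Not at hn
      by_cases hp : p ≤ (eggs.length : Int)
      · exact Or.inr (Or.inl hp)
      · right; right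
        by_contra hall
        push Not at hall
        exact hpre ⟨hn, by omega, fun k hk => by
          have := hall k (by omega)
          simpa using this⟩
  have h := go_lockstep n p q eggs n.toNat 0 0 (by omega) (by omega) hinv
  simpa using h

theorem solve_raises : Claim_raises_solve := by
  unfold Claim_raises_solve
  constructor
  · intro n p q eggs _ hr
    unfold Pre_solve
    unfold Raises_solve at hr
    exact fun hp => hp hr
  · refine ⟨by decide, by decide, ?_⟩
    show solve_alt 2 2 5 [3] = 1
    unfold solve_alt
    rw [altGo]
    rw [if_neg (by push Not; refine ⟨by norm_num, by norm_num, by norm_num, by norm_num⟩)]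
    rw [altGo]
    rw [if_pos (by norm_num)]
    norm_num

-- witness self-check: the raise-witness indeed lies outside Pre_ (from solve_raises)
theorem solve_raises_witness_ok :
    ¬ Pre_solve (pvRaiseWitness_solve.1) (pvRaiseWitness_solve.2.1)
      (pvRaiseWitness_solve.2.2.1) (pvRaiseWitness_solve.2.2.2) :=
  solve_raises.1 _ _ _ _ (by decide) (by decide)
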